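-- pv_equiv track=rewrite | github.com/dlwodnr59/Volatility3-GUI | volgui.py | _first_issue_line
-- ===== SOURCE A (Python) =====
-- def _first_issue_line(stderr: str, stdout: str) -> str:
--     joined = "\n".join([stderr or "", stdout or ""])
--     for line in joined.splitlines():
--         s = line.strip()
--         if not s:
--             continue
--         up = s.upper()
--         if "WARNING" in up or "ERROR" in up or "UNSATISFIED REQUIREMENT" in up:
--             return s[:180]
--     for line in joined.splitlines():
--         s = line.strip()
--         if s and "Volatility 3 Framework" not in s:
--             return s[:180]
--     return ""
-- ===== SOURCE B (Python) =====
-- _KEYWORDS = ("WARNING", "ERROR", "UNSATISFIED REQUIREMENT")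
--
-- def _first_issue_line(stderr: str, stdout: str) -> str:
--     issue = None
--     fallback = None
--     for line in "\n".join([stderr or "", stdout or ""]).splitlines():
--         s = line.strip()
--         if not s:
--             continue
--         if issue is None and any(k in s.upper() for k in _KEYWORDS):
--             issue = s[:180]
--         if fallback is None and "Volatility 3 Framework" not in s:
--             fallback = s[:180]
--     if issue is not None:
--         return issue
--     if fallback is not None:
--         return fallback
--     return ""
-- ===== Notes on version B (the rewrite author's own statement) =====
-- stated objective: alternative
-- what changed: Replaces A's two sequential early-return scans over the split lines with a single full fold that accumulates a pair (first issue line, first fallback line) and picks between them once at the end.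
import Mathlib
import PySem

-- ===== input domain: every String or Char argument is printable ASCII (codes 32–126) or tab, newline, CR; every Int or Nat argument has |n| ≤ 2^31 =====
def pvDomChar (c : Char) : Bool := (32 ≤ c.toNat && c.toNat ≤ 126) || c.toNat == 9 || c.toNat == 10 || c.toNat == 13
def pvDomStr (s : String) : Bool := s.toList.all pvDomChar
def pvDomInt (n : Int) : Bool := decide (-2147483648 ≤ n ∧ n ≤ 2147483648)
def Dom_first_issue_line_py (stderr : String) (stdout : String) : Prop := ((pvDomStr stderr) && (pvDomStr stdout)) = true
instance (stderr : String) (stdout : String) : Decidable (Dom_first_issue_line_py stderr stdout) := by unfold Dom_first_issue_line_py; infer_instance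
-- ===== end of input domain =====

-- B replaces A's two sequential early-return scans with one full fold accumulating (first issue line, first fallback line); same return value, alternative decomposition.


-- ===== PORT A =====
-- first loop: return s[:180] for the first stripped non-empty line whose upper-case form contains a keyword
def pvA_issueLoop : List (List Char) → Option (List Char)
  | [] => none
  | line :: rest =>
    let s := PySem.Chars.strip line
    if s = [] then pvA_issueLoop rest
    else
      let up := PySem.Chars.upper s
      if PySem.Chars.isIn "WARNING".toList up || PySem.Chars.isIn "ERROR".toList up ||
         PySem.Chars.isIn "UNSATISFIED REQUIREMENT".toList up then
        some (PySem.List.slice s none (some 180))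
      else pvA_issueLoop rest

-- second loop: return s[:180] for the first stripped non-empty line not containing "Volatility 3 Framework"
def pvA_fallbackLoop : List (List Char) → Option (List Char)
  | [] => none
  | line :: rest =>
    let s := PySem.Chars.strip line
    if s ≠ [] ∧ ¬ PySem.Chars.isIn "Volatility 3 Framework".toList s = true then
      some (PySem.List.slice s none (some 180))
    else pvA_fallbackLoop rest

def first_issue_line_py (stderr : String) (stdout : String) : String :=
  let joined := PySem.Chars.join "\n".toList [stderr.toList, stdout.toList]
  let lines := PySem.Chars.splitlines joined
  match pvA_issueLoop lines with
  | some v => String.ofList v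
  | none =>
    match pvA_fallbackLoop lines with
    | some v => String.ofList v
    | none => ""

-- ===== PORT B =====
def pvB_keywords : List (List Char) :=
  ["WARNING".toList, "ERROR".toList, "UNSATISFIED REQUIREMENT".toList]

-- fold step: update the (issue?, fallback?) accumulator with one line
def pvB_step (acc : Option (List Char) × Option (List Char)) (line : List Char) :
    Option (List Char) × Option (List Char) :=
  let s := PySem.Chars.strip line
  if s = [] then acc
  else
    ((if acc.1 = none ∧ (pvB_keywords.any fun k => PySem.Chars.isIn k (PySem.Chars.upper s))
      then some (PySem.List.slice s none (some 180)) else acc.1),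
     (if acc.2 = none ∧ ¬ PySem.Chars.isIn "Volatility 3 Framework".toList s = true
      then some (PySem.List.slice s none (some 180)) else acc.2))

def first_issue_line_py_alt (stderr : String) (stdout : String) : String :=
  let joined := PySem.Chars.join "\n".toList [stderr.toList, stdout.toList]
  let acc := (PySem.Chars.splitlines joined).foldl pvB_step (none, none)
  match acc.1 with
  | some v => String.ofList v
  | none =>
    match acc.2 with
    | some v => String.ofList v
    | none => ""

-- ===== PRECONDITION & SPEC =====
def Spec_first_issue_line_py (stderr : String) (stdout : String) (out : String) : Prop := out = first_issue_line_py_alt stderr stdout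
instance (stderr : String) (stdout : String) (out : String) : Decidable (Spec_first_issue_line_py stderr stdout out) := by unfold Spec_first_issue_line_py; infer_instance

-- ===== CLAIM (what is proved, stated in full; the proofs are below) =====
def Claim_equal_first_issue_line_py : Prop := ∀ (stderr : String) (stdout : String), Dom_first_issue_line_py stderr stdout → Spec_first_issue_line_py stderr stdout (first_issue_line_py stderr stdout)

-- ===== LEMMAS AND PROOFS =====

-- invariant: the fold fills each component with the corresponding loop's answer, first writer wins
theorem pvB_fold_eq (lines : List (List Char)) :
    ∀ i f : Option (List Char),
      lines.foldl pvB_step (i, f) = (i.or (pvA_issueLoop lines), f.or (pvA_fallbackLoop lines)) := by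
  induction lines with
  | nil => intro i f; cases i <;> cases f <;> rfl
  | cons line rest ih =>
    intro i f
    simp only [List.foldl_cons, pvB_step, pvA_issueLoop, pvA_fallbackLoop]
    split_ifs <;> rw [ih] <;> cases i <;> cases f <;> simp_all [pvB_keywords]

-- ===== VERDICT (by name: the statement is the Claim_ definition above) =====
theorem first_issue_line_py_spec : Claim_equal_first_issue_line_py := by
  intro stderr stdout _
  show _ = _
  simp only [first_issue_line_py, first_issue_line_py_alt, pvB_fold_eq, Option.none_or]
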